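-- pv_equiv track=rewrite | github.com/NicoKNL/tue-osiris-gradescrape | gradescrape.py | is_list_rectangular
-- ===== SOURCE A (Python) =====
-- def is_list_rectangular(input_list):
--     column_length = None
--
--     for row_idx in range(len(input_list)):
--         if row_idx == 0:
--             column_length = len(input_list[row_idx])
--             continue
--
--         if len(input_list[row_idx]) != column_length:
--             return False
--
--     return True
-- ===== SOURCE B (Python) =====
-- def is_list_rectangular(input_list):
--     lengths = set()
--     for row in input_list:
--         lengths.add(len(row))
--     return len(lengths) <= 1
-- ===== Notes on version B (the rewrite author's own statement) =====
-- stated objective: simpler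
-- what changed: Replaces A's first-row-initialize + pairwise-compare-with-early-return control flow by collecting the set of all distinct row lengths in one pass and testing its cardinality <= 1.
import Mathlib
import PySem

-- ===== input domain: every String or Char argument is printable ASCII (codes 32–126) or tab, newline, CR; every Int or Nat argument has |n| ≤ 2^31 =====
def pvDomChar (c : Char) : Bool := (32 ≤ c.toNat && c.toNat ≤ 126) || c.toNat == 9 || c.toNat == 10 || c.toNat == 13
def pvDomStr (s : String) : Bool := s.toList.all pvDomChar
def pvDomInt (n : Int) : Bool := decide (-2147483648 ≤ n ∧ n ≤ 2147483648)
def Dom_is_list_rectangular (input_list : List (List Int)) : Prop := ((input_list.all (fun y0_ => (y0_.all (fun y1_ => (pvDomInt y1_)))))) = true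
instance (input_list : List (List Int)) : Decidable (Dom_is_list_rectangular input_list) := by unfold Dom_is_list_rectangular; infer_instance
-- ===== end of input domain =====

-- B: collect the set of distinct row lengths in one pass and test its cardinality, instead of A's
-- first-row-initialize + pairwise-compare-with-early-return loop.
-- ===== PORT A =====
-- loop over rows carrying column_length (None before row 0), early `return False` = stop with false
def goA : List (List Int) → Option Nat → Bool
  | [], _ => true
  | r :: rest, none => goA rest (some r.length)        -- row_idx == 0: set column_length, continue
  | r :: rest, some c => if r.length ≠ c then false else goA rest (some c)

def is_list_rectangular (input_list : List (List Int)) : Bool := goA input_list none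

-- ===== PORT B =====
def is_list_rectangular_alt (input_list : List (List Int)) : Bool :=
  let lengths : PySem.Set Int :=
    input_list.foldl (fun s row => PySem.Set.add s (row.length : Int)) PySem.Set.empty
  decide (PySem.Set.len lengths ≤ 1)

-- ===== PRECONDITION & SPEC =====
def Spec_is_list_rectangular (input_list : List (List Int)) (out : Bool) : Prop := out = is_list_rectangular_alt input_list
instance (input_list : List (List Int)) (out : Bool) : Decidable (Spec_is_list_rectangular input_list out) := by unfold Spec_is_list_rectangular; infer_instance

-- ===== CLAIM (what is proved, stated in full; the proofs are below) =====
def Claim_equal_is_list_rectangular : Prop := ∀ (input_list : List (List Int)), Dom_is_list_rectangular input_list → Spec_is_list_rectangular input_list (is_list_rectangular input_list)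

-- ===== LEMMAS AND PROOFS =====

-- ===== VERDICT (by name: the statement is the Claim_ definition above) =====
-- foldl of Set.add never shrinks the set
lemma foldl_add_len_mono (rest : List (List Int)) (s : PySem.Set Int) :
    s.length ≤ (rest.foldl (fun s row => PySem.Set.add s ((row.length : Int))) s).length := by
  induction rest generalizing s with
  | nil => simp
  | cons r rest ih =>
      refine le_trans ?_ (ih (PySem.Set.add s (r.length : Int)))
      unfold PySem.Set.add
      split <;> simp

lemma key (rest : List (List Int)) (c : Nat) :
    goA rest (some c)
      = decide (PySem.Set.len
          (rest.foldl (fun s row => PySem.Set.add s ((row.length : Int))) [(c : Int)]) ≤ 1) := by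
  induction rest generalizing c with
  | nil => simp [goA, PySem.Set.len]
  | cons r rest ih =>
      by_cases h : r.length = c
      · have hadd : PySem.Set.add [(c : Int)] ((r.length : Int)) = [(c : Int)] := by
          simp [PySem.Set.add, PySem.Set.contains, h]
        simp [goA, h, ih c]
      · have hadd : PySem.Set.add [(c : Int)] ((r.length : Int)) = [(c : Int), (r.length : Int)] := by
          simp [PySem.Set.add, PySem.Set.contains]
          exact h
        have hm := foldl_add_len_mono rest [(c : Int), (r.length : Int)]
        have h2 : ¬ (PySem.Set.len
            (rest.foldl (fun s row => PySem.Set.add s ((row.length : Int)))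
              [(c : Int), (r.length : Int)]) ≤ 1) := by
          have hm2 : 2 ≤ (rest.foldl (fun s row => PySem.Set.add s ((row.length : Int)))
              [(c : Int), (r.length : Int)]).length := by simpa using hm
          unfold PySem.Set.len
          omega
        simp only [goA, List.foldl_cons, hadd]
        rw [if_pos h]
        exact (decide_eq_false h2).symm

theorem is_list_rectangular_spec : Claim_equal_is_list_rectangular := by
  intro l _
  unfold Spec_is_list_rectangular is_list_rectangular is_list_rectangular_alt
  cases l with
  | nil => simp [goA, PySem.Set.empty, PySem.Set.len]
  | cons r rest =>
      have hadd : PySem.Set.add PySem.Set.empty ((r.length : Int)) = [(r.length : Int)] := by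
        simp [PySem.Set.add, PySem.Set.contains, PySem.Set.empty]
      simp only [goA, List.foldl_cons, hadd]
      exact key rest r.length
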